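-- pv_equiv track=rewrite | github.com/johnhartmann26/starframe | main.py | starframe_counter
-- ===== SOURCE A (Python) =====
-- def starframe_counter(rounds, players):
--     starframe_count = 0
--     for card in rounds:
--         if len(card) >= len(players) + 1:
--             cards_birdies = []
--             par = []
--             for player in card:
--                 if player[0] == 'Par':
--                     par = player
--                 else:
--                     # logs player's name, then checks for birdies
--                     birdies = [player[0]]
--                     for score in range(6, len(par)):
--                         if player[score] != "0" and player[score] < par[score]:
--                             birdies.append(score - 5)
--                     cards_birdies.append(birdies)
--             last_hole_birdied = 0
--             for player_card in cards_birdies: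
--                 if type(player_card[-1]) is int:
--                     if last_hole_birdied < player_card[-1]:
--                         last_hole_birdied = player_card[-1]
--             starframes = [
--                 f'Course: {card[0][1]}',
--                 f'Timestamp: {card[0][3]}',
--             ]
--             for hole in range(1, last_hole_birdied + 1):
--                 starframe = True
--                 for row in cards_birdies:
--                     if hole not in row:
--                         starframe = False
--                 if starframe:
--                     starframes.append(hole)
--             starframe_count += len(starframes) - 2
--     return starframe_count
-- ===== SOURCE B (Python) =====
-- def starframe_counter(rounds, players):
--     total = 0
--     for card in rounds:
--         if len(card) <= len(players):
--             continue
--         par = []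
--         sets = []
--         for row in card:
--             if row[0] == 'Par':
--                 par = row
--             else:
--                 sets.append({i - 5 for i in range(6, len(par))
--                              if row[i] != "0" and row[i] < par[i]})
--         if sets:
--             common = sets[0]
--             for s in sets[1:]:
--                 common &= s
--             total += len(common)
--     return total
-- ===== Notes on version B (the rewrite author's own statement) =====
-- stated objective: alternative
-- what changed: Instead of scanning every hole 1..last_hole_birdied and testing membership in every player's birdie list, B builds one birdie-hole set per player and adds the size of their intersection, dropping the last-hole-birdied pass and the per-hole membership scans.
import Mathlib
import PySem

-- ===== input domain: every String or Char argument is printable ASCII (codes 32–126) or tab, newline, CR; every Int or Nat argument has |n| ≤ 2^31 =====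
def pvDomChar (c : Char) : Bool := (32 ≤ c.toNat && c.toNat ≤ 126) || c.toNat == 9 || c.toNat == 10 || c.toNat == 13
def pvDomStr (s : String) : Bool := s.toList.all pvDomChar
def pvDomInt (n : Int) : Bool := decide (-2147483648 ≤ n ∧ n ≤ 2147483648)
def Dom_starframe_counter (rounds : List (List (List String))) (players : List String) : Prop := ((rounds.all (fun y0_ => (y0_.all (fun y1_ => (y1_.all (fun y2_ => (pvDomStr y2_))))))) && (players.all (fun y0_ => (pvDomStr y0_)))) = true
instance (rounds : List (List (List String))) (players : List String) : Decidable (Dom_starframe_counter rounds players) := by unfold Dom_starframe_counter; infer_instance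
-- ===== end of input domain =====

-- B replaces A's per-hole scan over range(1, last_hole_birdied+1) with nested membership tests
-- by per-player birdie-hole sets intersected once (objective: alternative algorithm).

-- ===== PORT A =====
-- birdies loop: 'for score in range(6, len(par)): if player[score] != "0" and player[score] < par[score]: birdies.append(score - 5)'
-- (A's heterogeneous list [name, h1, h2, …] is ported as the pair (name, holes); 'type(x[-1]) is int' ↔ holes ≠ [],
--  and 'hole in row' ↔ hole ∈ holes, since an int never equals the name string in Python)
def aBirdies (par player : List String) : List Int :=
  (PySem.List.pyRange 6 (par.length : Int) 1).foldl
    (fun bs score =>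
      if PySem.List.pyGetD player score "" ≠ "0" ∧
         PySem.List.pyGetD player score "" < PySem.List.pyGetD par score "" then
        bs ++ [score - 5]
      else bs) []

-- 'for player in card: if player[0] == "Par": par = player else: cards_birdies.append(birdies)'
def aCollect (card : List (List String)) : List (String × List Int) × List String :=
  card.foldl
    (fun st player =>
      if PySem.List.pyGetD player 0 "" = "Par" then (st.1, player)
      else (st.1 ++ [(PySem.List.pyGetD player 0 "", aBirdies st.2 player)], st.2))
    ([], [])

-- 'for player_card in cards_birdies: if type(player_card[-1]) is int: …'
def aLast (cb : List (String × List Int)) : Int :=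
  cb.foldl
    (fun l pc =>
      match pc.2.getLast? with
      | some h => if l < h then h else l
      | none => l) 0

-- the body of A's 'for card in rounds' loop
def aCardStep (players : List String) (count : Int) (card : List (List String)) : Int :=
  if (players.length : Int) + 1 ≤ (card.length : Int) then
    let cb := (aCollect card).1
    let last := aLast cb
    let starframes0 : List String :=
      ["Course: " ++ PySem.List.pyGetD (PySem.List.pyGetD card 0 []) 1 "",
       "Timestamp: " ++ PySem.List.pyGetD (PySem.List.pyGetD card 0 []) 3 ""]
    let starframes := (PySem.List.pyRange 1 (last + 1) 1).foldl
      (fun sf hole =>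
        if cb.foldl (fun b row => if hole ∈ row.2 then b else false) true then
          sf ++ [PySem.Int.toStr hole]
        else sf) starframes0
    count + ((starframes.length : Int) - 2)
  else count

def starframe_counter (rounds : List (List (List String))) (players : List String) : Int :=
  rounds.foldl (aCardStep players) 0

-- ===== PORT B =====
-- '{i - 5 for i in range(6, len(par)) if row[i] != "0" and row[i] < par[i]}'
def bBirdieSet (par row : List String) : PySem.Set Int :=
  PySem.Set.ofList
    ((PySem.List.pyRange 6 (par.length : Int) 1).filterMap
      (fun i =>
        if PySem.List.pyGetD row i "" ≠ "0" ∧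
           PySem.List.pyGetD row i "" < PySem.List.pyGetD par i "" then some (i - 5)
        else none))

def bCollect (card : List (List String)) : List (PySem.Set Int) × List String :=
  card.foldl
    (fun st row =>
      if PySem.List.pyGetD row 0 "" = "Par" then (st.1, row)
      else (st.1 ++ [bBirdieSet st.2 row], st.2))
    ([], [])

-- the body of B's 'for card in rounds' loop: intersect the sets, add the size
def bCardStep (players : List String) (total : Int) (card : List (List String)) : Int :=
  if (card.length : Int) ≤ (players.length : Int) then total
  else
    match (bCollect card).1 with
    | [] => total
    | s0 :: rest => total + PySem.Set.len (rest.foldl (fun c s => PySem.Set.inter c s) s0)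

def starframe_counter_alt (rounds : List (List (List String))) (players : List String) : Int :=
  rounds.foldl (bCardStep players) 0

-- ===== PRECONDITION & SPEC =====
-- Pre_ excludes inputs where A raises IndexError on a qualifying card (card[0] shorter than 4, an empty row,
-- or a player row shorter than a par row it is scored against).  It is slightly narrower than A's exact domain
-- only when a card has SEVERAL Par rows of different lengths: Pre_ bounds a player row by every earlier Par row,
-- while A scores it only against the most recent one and returns — see cites.
def Pre_starframe_counter (rounds : List (List (List String))) (players : List String) : Prop :=
  ∀ card ∈ rounds, players.length + 1 ≤ card.length →
    4 ≤ (card.headD []).length ∧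
    (∀ row ∈ card, row ≠ []) ∧
    card.Pairwise (fun p r => p.headD "" = "Par" → r.headD "" ≠ "Par" → p.length ≤ r.length)
instance (rounds : List (List (List String))) (players : List String) : Decidable (Pre_starframe_counter rounds players) := by unfold Pre_starframe_counter; infer_instance

def pvWitness_starframe_counter : List (List (List String)) × List String :=
  ([[["Par", "c", "p", "t", "x", "x", "4", "4"], ["Al", "c", "p", "t", "x", "x", "3", "5"]]], ["Al"])

def Spec_starframe_counter (rounds : List (List (List String))) (players : List String) (out : Int) : Prop := out = starframe_counter_alt rounds players
instance (rounds : List (List (List String))) (players : List String) (out : Int) : Decidable (Spec_starframe_counter rounds players out) := by unfold Spec_starframe_counter; infer_instance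

-- ===== CLAIM (what is proved, stated in full; the proofs are below) =====
def Claim_equal_starframe_counter : Prop := ∀ (rounds : List (List (List String))) (players : List String), Dom_starframe_counter rounds players → Pre_starframe_counter rounds players → Spec_starframe_counter rounds players (starframe_counter rounds players)

-- ===== LEMMAS AND PROOFS =====

lemma filterMap_ite_eq {α β : Type} (p : α → Prop) [DecidablePred p] (f : α → β) (l : List α) :
    l.filterMap (fun x => if p x then some (f x) else none)
      = (l.filter (fun x => decide (p x))).map f := by
  induction l with
  | nil => rfl
  | cons a t ih => by_cases h : p a <;> simp [h, ih]

lemma aBirdies_eq (par player : List String) :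
    aBirdies par player
      = ((PySem.List.pyRange 6 (par.length : Int) 1).filter
          (fun i => decide (PySem.List.pyGetD player i "" ≠ "0" ∧
            PySem.List.pyGetD player i "" < PySem.List.pyGetD par i ""))).map (fun i => i - 5) := by
  unfold aBirdies
  simpa using PySem.List.foldl_append_ite
    (fun i => PySem.List.pyGetD player i "" ≠ "0" ∧
      PySem.List.pyGetD player i "" < PySem.List.pyGetD par i "")
    (fun i => i - 5) (PySem.List.pyRange 6 (par.length : Int) 1) []

lemma aBirdies_sorted (par player : List String) : (aBirdies par player).Pairwise (· < ·) := by
  rw [aBirdies_eq]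
  exact ((PySem.List.pairwise_lt_pyRange_one 6 (par.length : Int)).filter _).map _
    (fun a b h => by omega)

lemma aBirdies_pos (par player : List String) : ∀ x ∈ aBirdies par player, 1 ≤ x := by
  rw [aBirdies_eq]
  intro x hx
  simp only [List.mem_map, List.mem_filter, PySem.List.mem_pyRange_one] at hx
  obtain ⟨i, ⟨⟨h6, _⟩, _⟩, rfl⟩ := hx
  omega

lemma bBirdieSet_eq (par row : List String) : bBirdieSet par row = aBirdies par row := by
  unfold bBirdieSet
  rw [filterMap_ite_eq, ← aBirdies_eq]
  exact PySem.Set.ofList_eq_self_of_nodup _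
    ((aBirdies_sorted par row).imp (fun h => ne_of_lt h))

lemma le_getLast_of_pairwise :
    ∀ (l : List Int), l.Pairwise (· < ·) → ∀ x ∈ l, ∀ g, l.getLast? = some g → x ≤ g := by
  intro l
  induction l with
  | nil => simp
  | cons a t ih =>
    intro hp x hx g hg
    rcases List.mem_cons.mp hx with rfl | hxt
    · cases t with
      | nil => simp at hg; omega
      | cons b u =>
        have hg' : (b :: u).getLast? = some g := by simpa [List.getLast?_cons_cons] using hg
        have hbg : b ≤ g := ih hp.of_cons b (List.mem_cons_self) g hg'
        have hxb : x < b := (List.pairwise_cons.mp hp).1 b (List.mem_cons_self)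
        omega
    · have hne : t ≠ [] := List.ne_nil_of_mem hxt
      have hg' : t.getLast? = some g := by
        cases t with
        | nil => exact absurd rfl hne
        | cons b u => simpa [List.getLast?_cons_cons] using hg
      exact ih hp.of_cons x hxt g hg'

lemma le_aLast_foldl :
    ∀ (l : List (String × List Int)) (a : Int),
      a ≤ l.foldl (fun l pc =>
        match pc.2.getLast? with
        | some h => if l < h then h else l
        | none => l) a := by
  intro l
  induction l with
  | nil => intro a; simp
  | cons pc t ih =>
    intro a
    rw [List.foldl_cons]
    refine le_trans ?_ (ih _)
    cases hg : pc.2.getLast? with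
    | none => exact le_refl a
    | some h => dsimp only; split <;> omega

lemma aLast_ge_of_mem :
    ∀ (l : List (String × List Int)) (a : Int) (pc : String × List Int), pc ∈ l →
      ∀ g, pc.2.getLast? = some g →
        g ≤ l.foldl (fun l pc =>
          match pc.2.getLast? with
          | some h => if l < h then h else l
          | none => l) a := by
  intro l
  induction l with
  | nil => simp
  | cons q t ih =>
    intro a pc hpc g hg
    rcases List.mem_cons.mp hpc with rfl | hmem
    · rw [List.foldl_cons]
      refine le_trans ?_ (le_aLast_foldl t _)
      rw [hg]
      dsimp only; split <;> omega
    · exact ih _ pc hmem g hg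

lemma foldl_and_eq_all (hole : Int) :
    ∀ (l : List (String × List Int)) (b : Bool),
      l.foldl (fun b row => if hole ∈ row.2 then b else false) b
        = (b && l.all (fun row => decide (hole ∈ row.2))) := by
  intro l
  induction l with
  | nil => intro b; simp
  | cons r t ih =>
    intro b
    rw [List.foldl_cons, ih]
    by_cases h : hole ∈ r.2 <;> simp [h]

lemma foldl_inter_eq :
    ∀ (rest : List (List Int)) (s0 : List Int),
      rest.foldl (fun c s => PySem.Set.inter c s) s0
        = s0.filter (fun x => rest.all (fun s => List.contains s x)) := by
  intro rest
  induction rest with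
  | nil => intro s0; simp
  | cons s t ih =>
    intro s0
    rw [List.foldl_cons, ih]
    show (List.filter (fun x => PySem.Set.contains s x) s0).filter _ = _
    rw [List.filter_filter]
    refine List.filter_congr (fun x _ => ?_)
    simp [Bool.and_comm]

lemma collect_rel :
    ∀ (card : List (List String)) (accA : List (String × List Int)) (par : List String),
      card.foldl
        (fun st row =>
          if PySem.List.pyGetD row 0 "" = "Par" then (st.1, row)
          else (st.1 ++ [bBirdieSet st.2 row], st.2)) (accA.map Prod.snd, par)
      = ((card.foldl
            (fun st player =>
              if PySem.List.pyGetD player 0 "" = "Par" then (st.1, player)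
              else (st.1 ++ [(PySem.List.pyGetD player 0 "", aBirdies st.2 player)], st.2))
            (accA, par)).1.map Prod.snd,
         (card.foldl
            (fun st player =>
              if PySem.List.pyGetD player 0 "" = "Par" then (st.1, player)
              else (st.1 ++ [(PySem.List.pyGetD player 0 "", aBirdies st.2 player)], st.2))
            (accA, par)).2) := by
  intro card
  induction card with
  | nil => intro accA par; simp
  | cons row t ih =>
    intro accA par
    by_cases h : PySem.List.pyGetD row 0 "" = "Par"
    · simp only [List.foldl_cons, if_pos h]
      exact ih accA row
    · simp only [List.foldl_cons, if_neg h]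
      have := ih (accA ++ [(PySem.List.pyGetD row 0 "", aBirdies par row)]) par
      simpa [bBirdieSet_eq] using this

lemma collect_good :
    ∀ (card : List (List String)) (accA : List (String × List Int)) (par : List String),
      (∀ pc ∈ accA, pc.2.Pairwise (· < ·) ∧ ∀ x ∈ pc.2, 1 ≤ x) →
      ∀ pc ∈ (card.foldl
          (fun st player =>
            if PySem.List.pyGetD player 0 "" = "Par" then (st.1, player)
            else (st.1 ++ [(PySem.List.pyGetD player 0 "", aBirdies st.2 player)], st.2))
          (accA, par)).1,
        pc.2.Pairwise (· < ·) ∧ ∀ x ∈ pc.2, 1 ≤ x := by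
  intro card
  induction card with
  | nil => intro accA par hacc; simpa using hacc
  | cons row t ih =>
    intro accA par hacc
    by_cases h : PySem.List.pyGetD row 0 "" = "Par"
    · simp only [List.foldl_cons, if_pos h]
      exact ih accA row hacc
    · simp only [List.foldl_cons, if_neg h]
      refine ih _ par ?_
      intro pc hpc
      rcases List.mem_append.mp hpc with hl | hr
      · exact hacc pc hl
      · rcases List.mem_singleton.mp hr with rfl
        exact ⟨aBirdies_sorted par row, aBirdies_pos par row⟩

lemma card_step_eq (players : List String) (count : Int) (card : List (List String)) :
    aCardStep players count card = bCardStep players count card := by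
  by_cases hq : (players.length : Int) + 1 ≤ (card.length : Int)
  · have hq' : ¬ ((card.length : Int) ≤ (players.length : Int)) := by omega
    unfold aCardStep bCardStep
    rw [if_pos hq, if_neg hq']
    have hsets : (bCollect card).1 = (aCollect card).1.map Prod.snd := by
      unfold bCollect aCollect
      have := collect_rel card [] []
      simpa using congrArg Prod.fst this
    have hgood : ∀ pc ∈ (aCollect card).1, pc.2.Pairwise (· < ·) ∧ ∀ x ∈ pc.2, 1 ≤ x := by
      unfold aCollect
      exact collect_good card [] [] (by simp)
    cases hcb : (aCollect card).1 with
    | nil =>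
      rw [hsets, hcb]
      simp [aLast]
    | cons r0 t =>
      rw [hsets, hcb]
      dsimp only
      -- A side: starframes length
      set last := aLast (r0 :: t) with hlast
      rw [PySem.List.foldl_append_if (fun hole =>
            (r0 :: t).foldl (fun b row => if hole ∈ row.2 then b else false) true)
            (fun hole => PySem.Int.toStr hole) _ _]
      simp only [List.map_cons]
      rw [foldl_inter_eq]
      -- reduce to equal filter lengths
      have hlen :
          ((PySem.List.pyRange 1 (last + 1) 1).filter (fun hole =>
            (r0 :: t).foldl (fun b row => if hole ∈ row.2 then b else false) true)).length
          = (r0.2.filter (fun x => (t.map Prod.snd).all (fun s => List.contains s x))).length := by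
        have hr0 := hgood r0 (hcb ▸ List.mem_cons_self)
        have hnods0 : r0.2.Nodup := hr0.1.imp (fun h => ne_of_lt h)
        refine List.Perm.length_eq ((List.perm_ext_iff_of_nodup ?_ ?_).mpr ?_)
        · exact (PySem.List.nodup_pyRange_one _ _).filter _
        · exact hnods0.filter _
        intro x
        have hmemiff : ∀ (b : Bool),
            ((r0 :: t).foldl (fun b row => if x ∈ row.2 then b else false) b = (b && (r0 :: t).all (fun row => decide (x ∈ row.2)))) :=
          fun b => foldl_and_eq_all x (r0 :: t) b
        constructor
        · intro hx
          rcases List.mem_filter.mp hx with ⟨hxr, hp⟩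
          rw [hmemiff true] at hp
          simp only [Bool.true_and, List.all_eq_true, decide_eq_true_eq] at hp
          refine List.mem_filter.mpr ⟨hp r0 List.mem_cons_self, ?_⟩
          simp only [List.all_eq_true, List.mem_map]
          rintro s ⟨pc, hpc, rfl⟩
          exact List.elem_eq_true_of_mem (hp pc (List.mem_cons_of_mem _ hpc))
        · intro hx
          rcases List.mem_filter.mp hx with ⟨hxr, hq2⟩
          simp only [List.all_eq_true, List.mem_map] at hq2
          have hall : ∀ row ∈ (r0 :: t), x ∈ row.2 := by
            intro row hrow
            rcases List.mem_cons.mp hrow with rfl | hrt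
            · exact hxr
            · exact List.mem_of_elem_eq_true (hq2 _ ⟨row, hrt, rfl⟩)
          refine List.mem_filter.mpr ⟨?_, ?_⟩
          · -- x ∈ pyRange 1 (last+1) 1
            rw [PySem.List.mem_pyRange_one]
            have hx1 : 1 ≤ x := hr0.2 x hxr
            have hne : r0.2 ≠ [] := List.ne_nil_of_mem hxr
            obtain ⟨g, hg⟩ := Option.isSome_iff_exists.mp (List.getLast?_isSome.mpr hne)
            have hxg : x ≤ g := le_getLast_of_pairwise r0.2 hr0.1 x hxr g hg
            have hgl : g ≤ last := by
              rw [hlast]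
              exact aLast_ge_of_mem (r0 :: t) 0 r0 List.mem_cons_self g hg
            omega
          · rw [hmemiff true]
            simp only [Bool.true_and, List.all_eq_true, decide_eq_true_eq]
            exact hall
      simp only [List.length_append, List.length_map, List.length_cons, List.length_nil,
        PySem.Set.len]
      rw [hlen]
      push_cast
      omega
  · have hq' : (card.length : Int) ≤ (players.length : Int) := by omega
    unfold aCardStep bCardStep
    rw [if_neg hq, if_pos hq']

-- ===== VERDICT (by name: the statement is the Claim_ definition above) =====
theorem starframe_counter_spec : Claim_equal_starframe_counter := by
  intro rounds players _ _
  unfold Spec_starframe_counter starframe_counter starframe_counter_alt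
  have h : aCardStep players = bCardStep players :=
    funext fun c => funext fun card => card_step_eq players c card
  rw [h]
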